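-- pv_equiv track=rewrite | github.com/behindthegarage/ck-coding-lab | projects/state.py | choose_primary_code_file
-- ===== SOURCE A (Python) =====
-- from typing import Dict, Optional, Tuple
--
-- CODE_FILE_EXTENSIONS = ('.js', '.html', '.css', '.py')
--
-- PRIMARY_FILE_CANDIDATES = {
--     'html': ['index.html', 'main.js', 'script.js', 'styles.css'],
--     'python': ['main.py', 'app.py'],
--     'p5js': ['sketch.js', 'main.js'],
--     'undecided': ['sketch.js', 'main.js', 'index.html', 'main.py'],
-- }
--
-- def is_code_file(filename: str) -> bool:
--     """Return True when a filename is considered runnable/source code."""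
--     if not filename:
--         return False
--     return filename.endswith(CODE_FILE_EXTENSIONS)
--
-- def choose_primary_code_file(language: Optional[str], project_files: Dict[str, str]) -> Optional[str]:
--     """Choose the file whose contents should be mirrored into current_code."""
--     if not project_files:
--         return None
--
--     for filename in PRIMARY_FILE_CANDIDATES.get(language or 'undecided', PRIMARY_FILE_CANDIDATES['undecided']):
--         if filename in project_files and is_code_file(filename):
--             return filename
--
--     code_files = sorted(filename for filename in project_files if is_code_file(filename))
--     if len(code_files) == 1:
--         return code_files[0]
--     if 'index.html' in project_files:
--         return 'index.html'
--     if code_files: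
--         return code_files[0]
--     return None
-- ===== SOURCE B (Python) =====
-- from typing import Dict, Optional
--
-- CODE_FILE_EXTENSIONS = ('.js', '.html', '.css', '.py')
--
-- PRIMARY_FILE_CANDIDATES = {
--     'html': ['index.html', 'main.js', 'script.js', 'styles.css'],
--     'python': ['main.py', 'app.py'],
--     'p5js': ['sketch.js', 'main.js'],
--     'undecided': ['sketch.js', 'main.js', 'index.html', 'main.py'],
-- }
--
-- def _is_code(filename: str) -> bool:
--     return bool(filename) and filename.endswith(CODE_FILE_EXTENSIONS)
--
-- def choose_primary_code_file(language: Optional[str], project_files: Dict[str, str]) -> Optional[str]: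
--     for filename in PRIMARY_FILE_CANDIDATES.get(language or 'undecided', PRIMARY_FILE_CANDIDATES['undecided']):
--         if filename in project_files and _is_code(filename):
--             return filename
--     count = 0
--     best = None
--     for filename in project_files:
--         if _is_code(filename):
--             count += 1
--             if best is None or filename < best:
--                 best = filename
--     if count == 1:
--         return best
--     if 'index.html' in project_files:
--         return 'index.html'
--     return best
-- ===== Notes on version B (the rewrite author's own statement) =====
-- stated objective: alternative
-- what changed: The sorted() fallback that builds and sorts the full list of code files is replaced by a single pass over the dict keys maintaining a count and a running lexicographic minimum, and the redundant empty-dict guard is dropped.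
import Mathlib
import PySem

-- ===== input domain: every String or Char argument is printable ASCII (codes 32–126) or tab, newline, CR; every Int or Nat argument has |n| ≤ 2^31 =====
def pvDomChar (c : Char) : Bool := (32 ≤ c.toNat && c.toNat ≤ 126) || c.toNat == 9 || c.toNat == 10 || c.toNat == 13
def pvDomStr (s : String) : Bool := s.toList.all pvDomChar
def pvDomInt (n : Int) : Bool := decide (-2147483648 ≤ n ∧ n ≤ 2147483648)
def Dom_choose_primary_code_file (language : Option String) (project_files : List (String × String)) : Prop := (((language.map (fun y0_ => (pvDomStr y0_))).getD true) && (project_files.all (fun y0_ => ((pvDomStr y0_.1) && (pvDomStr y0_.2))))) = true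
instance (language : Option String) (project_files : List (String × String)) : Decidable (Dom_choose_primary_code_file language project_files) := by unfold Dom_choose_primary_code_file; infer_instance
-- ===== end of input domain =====

-- B replaces A's sorted() fallback by one pass keeping a count and a running lexicographic minimum (objective: alternative).

-- shared module-level context (same constants both Pythons use)
def pvIsCode (filename : String) : Bool :=
  if filename = "" then false
  else PySem.Str.endswith filename ".js" || PySem.Str.endswith filename ".html" ||
       PySem.Str.endswith filename ".css" || PySem.Str.endswith filename ".py"

def pvCandidates (language : Option String) : List String :=
  -- PRIMARY_FILE_CANDIDATES.get(language or 'undecided', PRIMARY_FILE_CANDIDATES['undecided'])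
  let lang := match language with
    | none => "undecided"
    | some s => if s = "" then "undecided" else s
  if lang = "html" then ["index.html", "main.js", "script.js", "styles.css"]
  else if lang = "python" then ["main.py", "app.py"]
  else if lang = "p5js" then ["sketch.js", "main.js"]
  else ["sketch.js", "main.js", "index.html", "main.py"]

-- ===== PORT A =====
def choose_primary_code_file (language : Option String) (project_files : List (String × String)) : Option String :=
  let d := PySem.Dict.ofList project_files
  if d.items.isEmpty then none
  else
    match (pvCandidates language).find? (fun f => d.contains f && pvIsCode f) with
    | some f => some f
    | none =>
      let code_files := PySem.List.sorted (d.keys.filter (fun f => pvIsCode f)) (fun x => x) false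
      if code_files.length = 1 then PySem.List.pyGet? code_files 0
      else if d.contains "index.html" then some "index.html"
      else if !code_files.isEmpty then PySem.List.pyGet? code_files 0
      else none

-- ===== PORT B =====
def choose_primary_code_file_alt (language : Option String) (project_files : List (String × String)) : Option String :=
  let d := PySem.Dict.ofList project_files
  match (pvCandidates language).find? (fun f => d.contains f && pvIsCode f) with
  | some f => some f
  | none =>
    let r := d.keys.foldl
      (fun (p : Nat × Option String) f =>
        if pvIsCode f then
          (p.1 + 1, match p.2 with
                    | none => some f
                    | some m => if f < m then some f else some m)
        else p)
      (0, none)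
    if r.1 = 1 then r.2
    else if d.contains "index.html" then some "index.html"
    else r.2

-- ===== PRECONDITION & SPEC =====
def Spec_choose_primary_code_file (language : Option String) (project_files : List (String × String)) (out : Option String) : Prop := out = choose_primary_code_file_alt language project_files
instance (language : Option String) (project_files : List (String × String)) (out : Option String) : Decidable (Spec_choose_primary_code_file language project_files out) := by unfold Spec_choose_primary_code_file; infer_instance

-- ===== CLAIM (what is proved, stated in full; the proofs are below) =====
def Claim_equal_choose_primary_code_file : Prop := ∀ (language : Option String) (project_files : List (String × String)), Dom_choose_primary_code_file language project_files → Spec_choose_primary_code_file language project_files (choose_primary_code_file language project_files)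

-- ===== LEMMAS AND PROOFS =====

-- B's one-pass step, and its minimum-only part
def pvStep (p : Nat × Option String) (f : String) : Nat × Option String :=
  if pvIsCode f then
    (p.1 + 1, match p.2 with
              | none => some f
              | some m => if f < m then some f else some m)
  else p

def pvUpd (o : Option String) (f : String) : Option String :=
  match o with
  | none => some f
  | some m => if f < m then some f else some m

theorem pvStep_filter (ks : List String) (p : Nat × Option String) :
    ks.foldl pvStep p =
      ((ks.filter (fun f => pvIsCode f)).length + p.1,
       (ks.filter (fun f => pvIsCode f)).foldl pvUpd p.2) := by
  induction ks generalizing p with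
  | nil => simp
  | cons k ks ih =>
    by_cases h : pvIsCode k = true
    · simp [pvStep, pvUpd, h, ih]
      omega
    · simp only [Bool.not_eq_true] at h
      simp [pvStep, h, ih]

theorem pvUpd_if (m c : String) : pvUpd (some m) c = some (if c < m then c else m) := by
  simp only [pvUpd]
  split <;> rfl

theorem pvFold_char (cs : List String) (m : String) :
    ∃ x, cs.foldl pvUpd (some m) = some x ∧ x ∈ m :: cs ∧ ∀ y ∈ m :: cs, x ≤ y := by
  induction cs generalizing m with
  | nil => exact ⟨m, rfl, by simp, by simp⟩
  | cons c cs ih =>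
    obtain ⟨x, hx, hmem, hle⟩ := ih (if c < m then c else m)
    refine ⟨x, ?_, ?_, ?_⟩
    · show cs.foldl pvUpd (pvUpd (some m) c) = some x
      rw [pvUpd_if]; exact hx
    · rcases List.mem_cons.mp hmem with h | h
      · subst h; split <;> simp
      · simp [h]
    · intro y hy
      have hxm' : x ≤ (if c < m then c else m) := hle _ (by simp)
      rcases List.mem_cons.mp hy with h | h
      · subst h
        exact le_trans hxm' (by split <;> [exact le_of_lt (by assumption); exact le_rfl])
      rcases List.mem_cons.mp h with h | h
      · subst h
        refine le_trans hxm' ?_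
        split <;> [exact le_rfl; exact le_of_not_gt (by assumption)]
      · exact hle _ (by simp [h])

theorem pvFold_eq_sorted_head (cs : List String) :
    cs.foldl pvUpd none = (PySem.List.sorted cs (fun x => x) false).head? := by
  cases hs : PySem.List.sorted cs (fun x => x) false with
  | nil =>
    have : cs = [] := (PySem.List.sorted_eq_nil_iff cs _ false).mp hs
    subst this; rfl
  | cons hmin t =>
    have hcs : cs ≠ [] := by
      intro h; subst h
      exact List.cons_ne_nil _ _ hs.symm
    obtain ⟨c, cs', hccs⟩ := List.exists_cons_of_ne_nil hcs
    subst hccs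
    obtain ⟨x, hx, hmem, hle⟩ := pvFold_char cs' c
    have hmin_mem : hmin ∈ c :: cs' :=
      (PySem.List.sorted_perm (c :: cs') (fun x => x) false).subset
        (by rw [hs]; exact List.mem_cons_self)
    have hmin_le : ∀ y ∈ c :: cs', hmin ≤ y :=
      PySem.List.key_head_sorted_le (c :: cs') (fun x => x) hs
    have hxm : x = hmin := le_antisymm (hle _ hmin_mem) (hmin_le _ hmem)
    show cs'.foldl pvUpd (pvUpd none c) = _
    rw [show pvUpd none c = some c from rfl, hx, hxm]
    rfl

theorem pvGet0_head (xs : List String) : PySem.List.pyGet? xs 0 = xs.head? := by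
  cases xs <;> simp [PySem.List.pyGet?, PySem.List.pyIdx?]

-- ===== VERDICT (by name: the statement is the Claim_ definition above) =====
theorem choose_primary_code_file_spec : Claim_equal_choose_primary_code_file := by
  intro language pf _
  show choose_primary_code_file language pf = choose_primary_code_file_alt language pf
  simp only [choose_primary_code_file, choose_primary_code_file_alt]
  set d := PySem.Dict.ofList pf with hd
  by_cases he : d.items.isEmpty = true
  · have hitems : d.items = [] := by simpa [List.isEmpty_iff] using he
    have hk : d.keys = [] := by simp [PySem.Dict.keys, hitems]
    have hc : ∀ f, d.contains f = false := by
      intro f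
      simp [PySem.Dict.contains, hitems]
    have hfind : (pvCandidates language).find? (fun f => d.contains f && pvIsCode f) = none := by
      rw [List.find?_eq_none]
      intro x _
      simp [hc]
    simp only [if_pos he, hfind, hk]
    simp [hc]
  · rw [if_neg he]
    cases hf : (pvCandidates language).find? (fun f => d.contains f && pvIsCode f) with
    | some f => rfl
    | none =>
      rw [show (fun (p : Nat × Option String) f =>
            if pvIsCode f then
              (p.1 + 1, match p.2 with
                        | none => some f
                        | some m => if f < m then some f else some m)
            else p) = pvStep from rfl]
      rw [pvStep_filter]
      set cs := d.keys.filter (fun f => pvIsCode f) with hcs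
      set S := PySem.List.sorted cs (fun x => x) false with hS
      have hlen : S.length = cs.length := PySem.List.length_sorted cs _ _
      have hfold : cs.foldl pvUpd none = S.head? := pvFold_eq_sorted_head cs
      simp only [hfold, Nat.add_zero, pvGet0_head, hlen]
      split_ifs with h1 h2 h3
      · rfl
      · rfl
      · rfl
      · have hSnil : S = [] := by simpa using h3
        rw [hSnil]
        rfl
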